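-- pv_equiv track=rewrite | github.com/patpij2/Logia-Competition-All-Solutions | logia 9/3/ilen.py | ilen
-- ===== SOURCE A (Python) =====
-- def ilen(n,mapa):
--     tab = [[1 for i in range(n)] for j in range(n)]
--
--     for k in range(len(mapa)):
--         for j in range(mapa[k][1],mapa[k][3]):
--             for i in range(mapa[k][0],mapa[k][2]):
--                 tab[j][i] = mapa[k][4]
--
--     for i in range(len(tab)):
--         tab += tab[0]
--         tab.remove(tab[0])
--
--     return [tab.count(1),tab.count(2),tab.count(3)]
-- ===== SOURCE B (Python) =====
-- def ilen(n, mapa):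
--     counts = [0, 0, 0]
--     for j in range(n):
--         for i in range(n):
--             c = 1
--             for r in reversed(mapa):
--                 if r[1] <= j < r[3] and r[0] <= i < r[2]:
--                     c = r[4]
--                     break
--             if 1 <= c <= 3:
--                 counts[c - 1] += 1
--     return counts
-- ===== Notes on version B (the rewrite author's own statement) =====
-- stated objective: alternative
-- what changed: Instead of mutating an n*n grid rectangle by rectangle and then flattening it with a quadratic remove loop, B computes each cell's colour directly as the colour of the last rectangle covering it (reverse scan with early exit) and tallies the three counters in one pass, with no grid and no flatten step; …
-- outside the precondition, e.g. on ilen(2, [[-1, 0, 1, 2, 2]]): A returns [0, 4, 0], B returns [2, 2, 0]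
import Mathlib
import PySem

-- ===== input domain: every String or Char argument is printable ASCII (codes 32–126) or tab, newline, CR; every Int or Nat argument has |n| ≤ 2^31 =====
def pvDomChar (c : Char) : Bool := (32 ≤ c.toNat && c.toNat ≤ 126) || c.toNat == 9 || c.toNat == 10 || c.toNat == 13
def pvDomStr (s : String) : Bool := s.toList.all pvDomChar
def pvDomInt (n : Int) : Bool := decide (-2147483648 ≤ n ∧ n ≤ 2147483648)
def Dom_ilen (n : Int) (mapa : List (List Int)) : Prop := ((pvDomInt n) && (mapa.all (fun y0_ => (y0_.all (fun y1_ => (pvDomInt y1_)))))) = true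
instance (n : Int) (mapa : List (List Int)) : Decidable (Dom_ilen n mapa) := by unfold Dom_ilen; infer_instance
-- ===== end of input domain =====

-- B replaces A's mutable grid painting + quadratic flatten/remove loop by a direct per-cell
-- "last covering rectangle" scan with running counters (alternative decomposition).


-- ===== PORT A =====
-- tab[j][i] = v   (Python indexing, negative wraps; out of range = IndexError, unreachable under Pre_)
def pvPaintCell (t : List (List Int)) (j i v : Int) : List (List Int) :=
  match PySem.List.pyGet? t j with
  | none => t
  | some row => PySem.List.pySetD t j (PySem.List.pySetD row i v)

-- Python's heterogeneous work list (whole rows, then plain ints) is modelled by PvCell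
inductive PvCell | row : List Int → PvCell | val : Int → PvCell
deriving DecidableEq, Repr

-- one iteration of 'tab += tab[0]; tab.remove(tab[0])';
-- the unreachable IndexError/TypeError arms return t
def pvFlatStep (t : List PvCell) : List PvCell :=
  match PySem.List.pyGet? t 0 with
  | none => t
  | some x =>
    match x with
    | PvCell.val _ => t
    | PvCell.row r =>
      let t1 := t ++ r.map PvCell.val
      (PySem.List.remove? t1 x).getD t1

def ilen (n : Int) (mapa : List (List Int)) : List Int :=
  let tab : List (List Int) :=
    (PySem.List.pyRange 0 n 1).map (fun _ => (PySem.List.pyRange 0 n 1).map (fun _ => (1 : Int)))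
  let tab := (PySem.List.pyRange 0 (mapa.length : Int) 1).foldl (fun t k =>
      let r := PySem.List.pyGetD mapa k []
      (PySem.List.pyRange (PySem.List.pyGetD r 1 0) (PySem.List.pyGetD r 3 0) 1).foldl (fun t j =>
        (PySem.List.pyRange (PySem.List.pyGetD r 0 0) (PySem.List.pyGetD r 2 0) 1).foldl (fun t i =>
          pvPaintCell t j i (PySem.List.pyGetD r 4 0)) t) t) tab
  let t2 : List PvCell := tab.map PvCell.row
  let t3 := (PySem.List.pyRange 0 (t2.length : Int) 1).foldl (fun t _ => pvFlatStep t) t2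
  [(PySem.List.count t3 (PvCell.val 1) : Int), (PySem.List.count t3 (PvCell.val 2) : Int),
   (PySem.List.count t3 (PvCell.val 3) : Int)]

-- ===== PORT B =====
-- r[1] <= j < r[3] and r[0] <= i < r[2]
def pvCovers (r : List Int) (j i : Int) : Bool :=
  decide (PySem.List.pyGetD r 1 0 ≤ j ∧ j < PySem.List.pyGetD r 3 0 ∧
          PySem.List.pyGetD r 0 0 ≤ i ∧ i < PySem.List.pyGetD r 2 0)

-- 'for r in reversed(mapa): if covers: c = r[4]; break' — first match in the reversed list
def pvCellColor (mapa : List (List Int)) (j i : Int) : Int :=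
  match mapa.reverse.find? (fun r => pvCovers r j i) with
  | some r => PySem.List.pyGetD r 4 0
  | none => 1

def ilen_alt (n : Int) (mapa : List (List Int)) : List Int :=
  (PySem.List.pyRange 0 n 1).foldl (fun counts j =>
    (PySem.List.pyRange 0 n 1).foldl (fun counts i =>
      let c := pvCellColor mapa j i
      if 1 ≤ c ∧ c ≤ 3 then
        PySem.List.pySetD counts (c - 1) (PySem.List.pyGetD counts (c - 1) 0 + 1)
      else counts) counts) [0, 0, 0]

-- ===== PRECONDITION & SPEC =====
-- Pre_ilen excludes the inputs where A raises (a row too short for the indices A reads — 1,3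
-- always, 0,2,4 once the painted region is non-empty — or a painted region past row/column n-1,
-- IndexError), and rectangles whose non-empty painted region has a negative x/y coordinate:
-- there A happens to return a value by Python's negative-index wraparound (painting the opposite
-- edge of the grid), an unspecified corner on which B's literal geometry is equally defensible.
def Pre_ilen (n : Int) (mapa : List (List Int)) : Prop :=
  ∀ r ∈ mapa, 4 ≤ r.length ∧
    (PySem.List.pyGetD r 1 0 < PySem.List.pyGetD r 3 0 ∧
     PySem.List.pyGetD r 0 0 < PySem.List.pyGetD r 2 0 →
      5 ≤ r.length ∧ 0 ≤ PySem.List.pyGetD r 1 0 ∧ PySem.List.pyGetD r 3 0 ≤ n ∧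
        0 ≤ PySem.List.pyGetD r 0 0 ∧ PySem.List.pyGetD r 2 0 ≤ n)
instance (n : Int) (mapa : List (List Int)) : Decidable (Pre_ilen n mapa) := by
  unfold Pre_ilen; infer_instance

def pvWitness_ilen : Int × List (List Int) := (3, [[0, 0, 2, 2, 2], [1, 1, 3, 3, 3]])

def Spec_ilen (n : Int) (mapa : List (List Int)) (out : List Int) : Prop :=
  out = ilen_alt n mapa
instance (n : Int) (mapa : List (List Int)) (out : List Int) : Decidable (Spec_ilen n mapa out) := by
  unfold Spec_ilen; infer_instance

-- ===== CLAIM (what is proved, stated in full; the proofs are below) =====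
def Claim_equal_ilen : Prop := ∀ (n : Int) (mapa : List (List Int)),
  Dom_ilen n mapa → Pre_ilen n mapa → Spec_ilen n mapa (ilen n mapa)

-- ===== LEMMAS AND PROOFS =====

-- the colour A's paint loop leaves in cell (j, i): last covering rectangle wins
def pvColor (mapa : List (List Int)) (j i : Int) : Int :=
  mapa.foldl (fun c r => if pvCovers r j i then PySem.List.pyGetD r 4 0 else c) 1

def pvGridOf (n : Nat) (f : Nat → Nat → Int) : List (List Int) :=
  (List.range n).map (fun j => (List.range n).map (fun i => f j i))

theorem pvGridOf_congr {n : Nat} {f g : Nat → Nat → Int}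
    (h : ∀ a < n, ∀ b < n, f a b = g a b) : pvGridOf n f = pvGridOf n g := by
  unfold pvGridOf
  refine List.map_congr_left (fun a ha => List.map_congr_left (fun b hb => ?_))
  exact h a (List.mem_range.mp ha) b (List.mem_range.mp hb)

theorem pvCellWrite (n : Nat) (f : Nat → Nat → Int) (j i v : Int)
    (hj0 : 0 ≤ j) (hjn : j < n) (hi0 : 0 ≤ i) (hin : i < n) :
    pvPaintCell (pvGridOf n f) j i v
      = pvGridOf n (fun a b => if a = j.toNat ∧ b = i.toNat then v else f a b) := by
  have hjn' : j.toNat < n := by omega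
  have hin' : i.toNat < n := by omega
  unfold pvPaintCell pvGridOf
  rw [PySem.List.pyGet?_of_nonneg _ hj0]
  have hrow : (List.map (fun a => List.map (fun b => f a b) (List.range n)) (List.range n))[j.toNat]?
      = some (List.map (fun b => f j.toNat b) (List.range n)) := by
    simp [List.getElem?_map, List.getElem?_range, hjn']
  rw [hrow]
  dsimp only
  rw [PySem.List.pySetD_of_nonneg _ _ hj0, PySem.List.pySetD_of_nonneg _ _ hi0]
  apply List.ext_getElem
  · simp
  · intro k h1 h2
    simp only [List.getElem_set, List.getElem_map, List.getElem_range]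
    split_ifs with hk
    · subst hk
      apply List.ext_getElem
      · simp
      · intro m h3 h4
        simp only [List.getElem_set, List.getElem_map, List.getElem_range]
        by_cases hm : i.toNat = m
        · simp [hm]
        · rw [if_neg hm, if_neg]
          intro hc; exact hm hc.2.symm
    · apply List.ext_getElem
      · simp
      · intro m h3 h4
        simp only [List.getElem_map, List.getElem_range]
        rw [if_neg]
        simp only [List.length_map, List.length_range] at h1
        intro hc
        exact hk hc.1.symm

theorem pvRowFold (L : List Int) (n : Nat) (f : Nat → Nat → Int) (j v : Int)
    (hj0 : 0 ≤ j) (hjn : j < n) (hL : ∀ x ∈ L, 0 ≤ x ∧ x < n) :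
    L.foldl (fun t i => pvPaintCell t j i v) (pvGridOf n f)
      = pvGridOf n (fun a b => if a = j.toNat ∧ (b : Int) ∈ L then v else f a b) := by
  induction L generalizing f with
  | nil =>
    simp only [List.foldl_nil]
    apply pvGridOf_congr; intro a ha b hb; simp
  | cons x L ih =>
    obtain ⟨hx0, hxn⟩ := hL x (by simp)
    rw [List.foldl_cons, pvCellWrite n f j x v hj0 hjn hx0 hxn,
        ih _ (fun y hy => hL y (by simp [hy]))]
    apply pvGridOf_congr; intro a ha b hb
    by_cases haj : a = j.toNat
    · by_cases hbL : (b : Int) ∈ L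
      · rw [if_pos ⟨haj, hbL⟩, if_pos ⟨haj, List.mem_cons.mpr (Or.inr hbL)⟩]
      · rw [if_neg (fun h => hbL h.2)]
        by_cases hbx : (b : Int) = x
        · rw [if_pos ⟨haj, by omega⟩, if_pos ⟨haj, List.mem_cons.mpr (Or.inl hbx)⟩]
        · rw [if_neg (fun h => hbx (by omega : (b : Int) = x)), if_neg]
          intro h
          rcases List.mem_cons.mp h.2 with h' | h'
          · exact hbx h'
          · exact hbL h'
    · rw [if_neg (fun h => haj h.1), if_neg (fun h => haj h.1), if_neg (fun h => haj h.1)]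

theorem pvRectFold (Lj Li : List Int) (n : Nat) (f : Nat → Nat → Int) (v : Int)
    (hLj : ∀ x ∈ Lj, 0 ≤ x ∧ x < n) (hLi : ∀ x ∈ Li, 0 ≤ x ∧ x < n) :
    Lj.foldl (fun t j => Li.foldl (fun t i => pvPaintCell t j i v) t) (pvGridOf n f)
      = pvGridOf n (fun a b => if (a : Int) ∈ Lj ∧ (b : Int) ∈ Li then v else f a b) := by
  induction Lj generalizing f with
  | nil =>
    simp only [List.foldl_nil]
    apply pvGridOf_congr; intro a ha b hb; simp
  | cons x Lj ih =>
    obtain ⟨hx0, hxn⟩ := hLj x (by simp)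
    rw [List.foldl_cons, pvRowFold Li n f x v hx0 hxn hLi,
        ih _ (fun y hy => hLj y (by simp [hy]))]
    apply pvGridOf_congr; intro a ha b hb
    by_cases hbi : (b : Int) ∈ Li
    · by_cases haL : (a : Int) ∈ Lj
      · rw [if_pos ⟨haL, hbi⟩, if_pos ⟨List.mem_cons.mpr (Or.inr haL), hbi⟩]
      · rw [if_neg (fun h => haL h.1)]
        by_cases hax : (a : Int) = x
        · rw [if_pos ⟨(by omega : a = x.toNat), hbi⟩,
              if_pos ⟨List.mem_cons.mpr (Or.inl hax), hbi⟩]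
        · rw [if_neg (fun h => hax (by omega : (a : Int) = x)), if_neg]
          intro h
          rcases List.mem_cons.mp h.1 with h' | h'
          · exact hax h'
          · exact haL h'
    · rw [if_neg (fun h => hbi h.2), if_neg (fun h => hbi h.2), if_neg (fun h => hbi h.2)]

theorem pvPaintAll (M : List (List Int)) (n : Nat) (f : Nat → Nat → Int)
    (hM : ∀ r ∈ M, (PySem.List.pyGetD r 1 0 < PySem.List.pyGetD r 3 0 ∧
                    PySem.List.pyGetD r 0 0 < PySem.List.pyGetD r 2 0) →
      0 ≤ PySem.List.pyGetD r 1 0 ∧ PySem.List.pyGetD r 3 0 ≤ n ∧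
      0 ≤ PySem.List.pyGetD r 0 0 ∧ PySem.List.pyGetD r 2 0 ≤ n) :
    M.foldl (fun t r =>
      (PySem.List.pyRange (PySem.List.pyGetD r 1 0) (PySem.List.pyGetD r 3 0) 1).foldl (fun t j =>
        (PySem.List.pyRange (PySem.List.pyGetD r 0 0) (PySem.List.pyGetD r 2 0) 1).foldl (fun t i =>
          pvPaintCell t j i (PySem.List.pyGetD r 4 0)) t) t) (pvGridOf n f)
    = pvGridOf n (fun a b =>
        M.foldl (fun c r => if pvCovers r a b then PySem.List.pyGetD r 4 0 else c) (f a b)) := by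
  induction M generalizing f with
  | nil => simp only [List.foldl_nil]
  | cons r M ih =>
    rw [List.foldl_cons]
    have hcong : ∀ g : Nat → Nat → Int,
        (∀ a < n, ∀ b < n, g a b = if pvCovers r a b then PySem.List.pyGetD r 4 0 else f a b) →
        M.foldl (fun t r =>
          (PySem.List.pyRange (PySem.List.pyGetD r 1 0) (PySem.List.pyGetD r 3 0) 1).foldl (fun t j =>
            (PySem.List.pyRange (PySem.List.pyGetD r 0 0) (PySem.List.pyGetD r 2 0) 1).foldl (fun t i =>
              pvPaintCell t j i (PySem.List.pyGetD r 4 0)) t) t) (pvGridOf n g)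
        = pvGridOf n (fun a b =>
            (r :: M).foldl (fun c r => if pvCovers r a b then PySem.List.pyGetD r 4 0 else c)
              (f a b)) := by
      intro g hg
      rw [ih g (fun r' hr' => hM r' (List.mem_cons_of_mem _ hr'))]
      apply pvGridOf_congr; intro a ha b hb
      rw [List.foldl_cons, hg a ha b hb]
    by_cases h13 : PySem.List.pyGetD r 1 0 < PySem.List.pyGetD r 3 0
    · by_cases h02 : PySem.List.pyGetD r 0 0 < PySem.List.pyGetD r 2 0
      · obtain ⟨hb1, hb3, hb0, hb2⟩ := hM r List.mem_cons_self ⟨h13, h02⟩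
        rw [pvRectFold _ _ n f (PySem.List.pyGetD r 4 0)
              (fun x hx => by
                have := PySem.List.mem_pyRange_one.mp hx
                exact ⟨by omega, by omega⟩)
              (fun x hx => by
                have := PySem.List.mem_pyRange_one.mp hx
                exact ⟨by omega, by omega⟩)]
        apply hcong
        intro a ha b hb
        have hmem : ((a : Int) ∈ PySem.List.pyRange (PySem.List.pyGetD r 1 0) (PySem.List.pyGetD r 3 0) 1
              ∧ (b : Int) ∈ PySem.List.pyRange (PySem.List.pyGetD r 0 0) (PySem.List.pyGetD r 2 0) 1)
            ↔ pvCovers r a b = true := by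
          simp only [PySem.List.mem_pyRange_one, pvCovers, decide_eq_true_eq]
          tauto
        exact if_congr hmem rfl rfl
      · -- inner range is empty: every row write loop is the identity
        rw [PySem.List.pyRange_one_eq_nil (by omega : PySem.List.pyGetD r 2 0 ≤ PySem.List.pyGetD r 0 0)]
        simp only [List.foldl_nil, List.foldl_fixed]
        apply hcong
        intro a ha b hb
        rw [if_neg]
        simp only [pvCovers, decide_eq_true_eq]
        omega
    · -- outer range is empty
      rw [PySem.List.pyRange_one_eq_nil (by omega : PySem.List.pyGetD r 3 0 ≤ PySem.List.pyGetD r 1 0)]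
      simp only [List.foldl_nil]
      apply hcong
      intro a ha b hb
      rw [if_neg]
      simp only [pvCovers, decide_eq_true_eq]
      omega

theorem pvFlatIter (rows : List (List Int)) (acc : List Int) (L : List Int) (hL : L.length = rows.length) :
    L.foldl (fun t _ => pvFlatStep t) (rows.map PvCell.row ++ acc.map PvCell.val)
      = ((acc ++ rows.flatten).map PvCell.val : List PvCell) := by
  induction rows generalizing acc L with
  | nil =>
    rw [List.length_eq_zero_iff.mp hL]
    simp
  | cons r rows ih =>
    cases L with
    | nil => simp at hL
    | cons x L =>
      rw [List.foldl_cons]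
      have hstep : pvFlatStep ((r :: rows).map PvCell.row ++ acc.map PvCell.val)
          = rows.map PvCell.row ++ ((acc ++ r).map PvCell.val) := by
        show pvFlatStep (PvCell.row r :: (rows.map PvCell.row ++ acc.map PvCell.val)) = _
        unfold pvFlatStep
        rw [PySem.List.pyGet?_zero_cons]
        show (PySem.List.remove?
            (PvCell.row r :: ((rows.map PvCell.row ++ acc.map PvCell.val) ++ r.map PvCell.val))
            (PvCell.row r)).getD _ = _
        rw [PySem.List.remove?_cons_self]
        simp [List.append_assoc]
      rw [hstep, ih (acc ++ r) L (by simpa using hL)]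
      simp

theorem pvCountMapInr (l : List Int) (c : Int) :
    (PySem.List.count (l.map PvCell.val) (PvCell.val c) : Nat) = l.count c := by
  rw [PySem.List.count_eq]
  exact List.count_map_of_injective l PvCell.val (fun a b h => by cases h; rfl) c

theorem pvFindRev (L : List (List Int)) (j i c0 : Int) :
    L.foldl (fun c r => if pvCovers r j i then PySem.List.pyGetD r 4 0 else c) c0
      = ((L.reverse.find? (fun r => pvCovers r j i)).map
          (fun r => PySem.List.pyGetD r 4 0)).getD c0 := by
  induction L generalizing c0 with
  | nil => simp
  | cons r L ih =>
    rw [List.foldl_cons, ih, List.reverse_cons, List.find?_append]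
    cases h : List.find? (fun r => pvCovers r j i) L.reverse with
    | some a => simp [h]
    | none =>
      cases hp : pvCovers r j i <;> simp [h, hp, List.find?_cons]

theorem pvCellColor_eq (mapa : List (List Int)) (j i : Int) :
    pvCellColor mapa j i = pvColor mapa j i := by
  unfold pvCellColor pvColor
  rw [pvFindRev]
  cases h : List.find? (fun r => pvCovers r j i) mapa.reverse <;> simp [h]

theorem pvTally {α : Type} (P : List α) (g : α → Int) (a b c : Int) :
    P.foldl (fun counts x =>
      if 1 ≤ g x ∧ g x ≤ 3 then
        PySem.List.pySetD counts (g x - 1) (PySem.List.pyGetD counts (g x - 1) 0 + 1)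
      else counts) [a, b, c]
    = [a + (P.countP (fun x => g x == 1) : Int),
       b + (P.countP (fun x => g x == 2) : Int),
       c + (P.countP (fun x => g x == 3) : Int)] := by
  induction P generalizing a b c with
  | nil => simp
  | cons x P ih =>
    rw [List.foldl_cons]
    by_cases h1 : g x = 1
    · have hstep : (if 1 ≤ g x ∧ g x ≤ 3 then
          PySem.List.pySetD [a, b, c] (g x - 1) (PySem.List.pyGetD [a, b, c] (g x - 1) 0 + 1)
        else [a, b, c]) = [a + 1, b, c] := by
        rw [if_pos (by omega), h1]
        norm_num [PySem.List.pyGetD_ofNat' [a, b, c] 0,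
          PySem.List.pySetD_of_nonneg _ _ (by norm_num : (0:Int) ≤ 0)]
      rw [hstep, ih]
      simp [List.countP_cons, h1]
      omega
    · by_cases h2 : g x = 2
      · have hstep : (if 1 ≤ g x ∧ g x ≤ 3 then
            PySem.List.pySetD [a, b, c] (g x - 1) (PySem.List.pyGetD [a, b, c] (g x - 1) 0 + 1)
          else [a, b, c]) = [a, b + 1, c] := by
          rw [if_pos (by omega), h2]
          norm_num [PySem.List.pyGetD_ofNat' [a, b, c] 1,
            PySem.List.pySetD_of_nonneg _ _ (by norm_num : (0:Int) ≤ 1)]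
        rw [hstep, ih]
        simp [List.countP_cons, h1, h2]
        omega
      · by_cases h3 : g x = 3
        · have hstep : (if 1 ≤ g x ∧ g x ≤ 3 then
              PySem.List.pySetD [a, b, c] (g x - 1) (PySem.List.pyGetD [a, b, c] (g x - 1) 0 + 1)
            else [a, b, c]) = [a, b, c + 1] := by
            rw [if_pos (by omega), h3]
            norm_num [PySem.List.pyGetD_ofNat' [a, b, c] 2,
              PySem.List.pySetD_of_nonneg _ _ (by norm_num : (0:Int) ≤ 2),
              show Int.toNat 2 = 2 from rfl]
          rw [hstep, ih]
          simp [List.countP_cons, h1, h2, h3]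
          omega
        · rw [if_neg (by omega), ih]
          simp [List.countP_cons, h1, h2, h3]

theorem pvCountProd (L1 L2 : List Int) (F : Int → Int → Int) (c : Int) :
    (L1.flatMap (fun j => L2.map (fun i => (j, i)))).countP (fun pr => F pr.1 pr.2 == c)
      = ((L1.map (fun j => L2.map (fun i => F j i))).flatten).count c := by
  induction L1 with
  | nil => simp
  | cons x L1 ih =>
    simp only [List.flatMap_cons, List.map_cons, List.flatten_cons, List.countP_append,
      List.count_append, ih, List.countP_map, List.count_eq_countP, Function.comp_def]

-- ===== VERDICT (by name: the statement is the Claim_ definition above) =====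
theorem ilen_spec : Claim_equal_ilen := by
  intro n mapa _hDom hPre
  unfold Spec_ilen
  have hb : ∀ r ∈ mapa, (PySem.List.pyGetD r 1 0 < PySem.List.pyGetD r 3 0 ∧
      PySem.List.pyGetD r 0 0 < PySem.List.pyGetD r 2 0) →
      0 ≤ PySem.List.pyGetD r 1 0 ∧ PySem.List.pyGetD r 3 0 ≤ (n.toNat : Int) ∧
      0 ≤ PySem.List.pyGetD r 0 0 ∧ PySem.List.pyGetD r 2 0 ≤ (n.toNat : Int) := by
    intro r hr h
    obtain ⟨-, h'⟩ := hPre r hr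
    obtain ⟨-, hb1, hb3, hb0, hb2⟩ := h' h
    refine ⟨?_, ?_, ?_, ?_⟩ <;> omega
  simp only [ilen, ilen_alt]
  -- A: the initial all-ones table is a grid of the constant-1 function
  have hg0 : (PySem.List.pyRange 0 n).map (fun _ => (PySem.List.pyRange 0 n).map (fun _ => (1 : Int)))
      = pvGridOf n.toNat (fun _ _ => 1) := by
    simp [PySem.List.pyRange_zero, pvGridOf, List.map_map, Function.comp_def]
  rw [hg0]
  -- A: rectangle index loop → fold over the rectangles themselves
  have hk : List.foldl (fun t k =>
        List.foldl (fun t j =>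
          List.foldl (fun t i =>
              pvPaintCell t j i (PySem.List.pyGetD (PySem.List.pyGetD mapa k []) 4 0)) t
            (PySem.List.pyRange (PySem.List.pyGetD (PySem.List.pyGetD mapa k []) 0 0)
              (PySem.List.pyGetD (PySem.List.pyGetD mapa k []) 2 0))) t
          (PySem.List.pyRange (PySem.List.pyGetD (PySem.List.pyGetD mapa k []) 1 0)
            (PySem.List.pyGetD (PySem.List.pyGetD mapa k []) 3 0)))
        (pvGridOf n.toNat (fun _ _ => 1)) (PySem.List.pyRange 0 (mapa.length : Int))
      = List.foldl (fun t r =>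
        List.foldl (fun t j =>
          List.foldl (fun t i => pvPaintCell t j i (PySem.List.pyGetD r 4 0)) t
            (PySem.List.pyRange (PySem.List.pyGetD r 0 0) (PySem.List.pyGetD r 2 0))) t
          (PySem.List.pyRange (PySem.List.pyGetD r 1 0) (PySem.List.pyGetD r 3 0)))
        (pvGridOf n.toNat (fun _ _ => 1)) mapa :=
    PySem.List.foldl_pyRange_zero_pyGetD' mapa ([] : List Int)
      (fun t r =>
        List.foldl (fun t j =>
          List.foldl (fun t i => pvPaintCell t j i (PySem.List.pyGetD r 4 0)) t
            (PySem.List.pyRange (PySem.List.pyGetD r 0 0) (PySem.List.pyGetD r 2 0))) t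
          (PySem.List.pyRange (PySem.List.pyGetD r 1 0) (PySem.List.pyGetD r 3 0)))
      (pvGridOf n.toNat (fun _ _ => 1))
  rw [hk, pvPaintAll mapa n.toNat (fun _ _ => 1) hb]
  -- A: the flatten loop
  have hflat := pvFlatIter (pvGridOf n.toNat fun a b =>
      List.foldl (fun c r => if pvCovers r ↑a ↑b then PySem.List.pyGetD r 4 0 else c) 1 mapa) []
    (PySem.List.pyRange 0
      ((((pvGridOf n.toNat fun a b =>
        List.foldl (fun c r => if pvCovers r ↑a ↑b then PySem.List.pyGetD r 4 0 else c) 1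
          mapa).map PvCell.row).length : Int)))
    (by simp [PySem.List.length_pyRange_one])
  rw [List.map_nil, List.append_nil] at hflat
  rw [hflat, List.nil_append]
  rw [pvCountMapInr, pvCountMapInr, pvCountMapInr]
  -- B: break-at-last-cover = fold over all rectangles
  simp only [pvCellColor_eq]
  -- B: nested cell loops → one fold over the list of cells
  have hB : ∀ init : List Int,
      (PySem.List.pyRange 0 n).foldl (fun counts j =>
        (PySem.List.pyRange 0 n).foldl (fun counts i =>
          if 1 ≤ pvColor mapa j i ∧ pvColor mapa j i ≤ 3 then
            PySem.List.pySetD counts (pvColor mapa j i - 1)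
              (PySem.List.pyGetD counts (pvColor mapa j i - 1) 0 + 1)
          else counts) counts) init
      = ((PySem.List.pyRange 0 n).flatMap (fun j =>
          (PySem.List.pyRange 0 n).map (fun i => (j, i)))).foldl (fun counts pr =>
          if 1 ≤ pvColor mapa pr.1 pr.2 ∧ pvColor mapa pr.1 pr.2 ≤ 3 then
            PySem.List.pySetD counts (pvColor mapa pr.1 pr.2 - 1)
              (PySem.List.pyGetD counts (pvColor mapa pr.1 pr.2 - 1) 0 + 1)
          else counts) init := by
    intro init
    rw [List.foldl_flatMap]
    simp only [List.foldl_map]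
  rw [hB]
  have hT := pvTally ((PySem.List.pyRange 0 n).flatMap (fun j =>
      (PySem.List.pyRange 0 n).map (fun i => (j, i)))) (fun pr => pvColor mapa pr.1 pr.2) 0 0 0
  rw [hT]
  simp only [zero_add]
  -- both sides count the same cells
  have hGrid : (PySem.List.pyRange 0 n).map (fun j => (PySem.List.pyRange 0 n).map
        (fun i => pvColor mapa j i))
      = pvGridOf n.toNat (fun a b => pvColor mapa ↑a ↑b) := by
    simp [PySem.List.pyRange_zero, pvGridOf, List.map_map, Function.comp_def]
  have hcnt : ∀ c : Int,
      ((pvGridOf n.toNat fun a b =>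
        List.foldl (fun c r => if pvCovers r ↑a ↑b then PySem.List.pyGetD r 4 0 else c) 1 mapa).flatten).count c
      = ((PySem.List.pyRange 0 n).flatMap (fun j =>
          (PySem.List.pyRange 0 n).map (fun i => (j, i)))).countP
          (fun pr => pvColor mapa pr.1 pr.2 == c) := by
    intro c
    rw [pvCountProd, hGrid]
    rfl
  rw [hcnt 1, hcnt 2, hcnt 3]
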